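-- pv_equiv track=rewrite | github.com/userstar713/m3-project | application/db_extension/dictionary_lookup/utils.py | get_unprocessed_chunks
-- ===== SOURCE A (Python) =====
-- def get_unprocessed_chunks(tokenized_words, processed_labels):
--     """
--     Return `chunks` - lists of not-processed tokens (splitted by processed tokens)
--     :param tokenized_words:
--     :param processed_labels:
--     :return:
--     """
--     result = []
--     group = []
--     for i in range(len(tokenized_words)):
--         if processed_labels[i]:
--             if group:
--                 result.append(group)
--                 group = []
--         else:
--             group.append((tokenized_words[i], i))  # (word, position)
--     if group:
--         result.append(group)
--     return result
-- ===== SOURCE B (Python) =====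
-- def get_unprocessed_chunks(tokenized_words, processed_labels):
--     """
--     Return `chunks` - lists of not-processed tokens (splitted by processed tokens)
--     Run-scanning version: find each maximal run of unprocessed indices with a
--     two-pointer scan and emit it as one chunk, instead of a group accumulator.
--     """
--     n = len(tokenized_words)
--     result = []
--     i = 0
--     while i < n:
--         if processed_labels[i]:
--             i += 1
--         else:
--             j = i
--             while j < n and not processed_labels[j]:
--                 j += 1
--             result.append([(tokenized_words[k], k) for k in range(i, j)])
--             i = j
--     return result
-- ===== Notes on version B (the rewrite author's own statement) =====
-- stated objective: alternative
-- what changed: Replaced the per-index state machine (mutable group accumulator with explicit flushes) by a two-pointer run scanner that finds each maximal run of unprocessed indices and emits it as one chunk.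
import Mathlib
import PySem

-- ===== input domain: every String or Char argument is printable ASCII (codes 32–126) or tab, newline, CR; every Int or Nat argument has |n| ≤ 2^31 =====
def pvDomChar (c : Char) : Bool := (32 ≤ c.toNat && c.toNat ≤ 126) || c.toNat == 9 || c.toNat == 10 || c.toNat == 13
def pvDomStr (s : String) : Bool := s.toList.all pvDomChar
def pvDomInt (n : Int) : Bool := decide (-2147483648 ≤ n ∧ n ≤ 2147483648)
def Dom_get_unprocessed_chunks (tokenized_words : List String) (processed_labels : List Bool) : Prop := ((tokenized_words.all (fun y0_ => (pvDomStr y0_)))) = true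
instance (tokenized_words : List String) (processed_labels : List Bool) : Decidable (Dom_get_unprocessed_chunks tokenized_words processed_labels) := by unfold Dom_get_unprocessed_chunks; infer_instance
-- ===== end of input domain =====

-- B replaces A's per-index state machine (group accumulator with explicit flushes)
-- by a two-pointer run scanner emitting each maximal unprocessed run as one chunk;
-- same cost, different decomposition ("alternative").

-- ===== PORT A =====
-- one loop step of A: the body of `for i in range(len(tokenized_words))`
def pvStepA (tokenized_words : List String) (processed_labels : List Bool)
    (st : List (List (String × Int)) × List (String × Int)) (i : Nat) :
    List (List (String × Int)) × List (String × Int) :=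
  if processed_labels.getD i false then
    if st.2 ≠ [] then (st.1 ++ [st.2], []) else st
  else
    (st.1, st.2 ++ [(tokenized_words.getD i "", (i : Int))])

def get_unprocessed_chunks (tokenized_words : List String) (processed_labels : List Bool) :
    List (List (String × Int)) :=
  let st := (List.range tokenized_words.length).foldl (pvStepA tokenized_words processed_labels) ([], [])
  if st.2 ≠ [] then st.1 ++ [st.2] else st.1

-- ===== PORT B =====
-- inner while loop of B: first index j ≥ start with j = n or processed_labels[j]
def pvRunEnd (tokenized_words : List String) (processed_labels : List Bool) (j : Nat) : Nat :=
  if j < tokenized_words.length ∧ processed_labels.getD j false = false then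
    pvRunEnd tokenized_words processed_labels (j + 1)
  else j
termination_by tokenized_words.length - j
decreasing_by omega

theorem pvRunEnd_ge (tokenized_words : List String) (processed_labels : List Bool) (j : Nat) :
    j ≤ pvRunEnd tokenized_words processed_labels j := by
  rw [pvRunEnd]
  split
  · have := pvRunEnd_ge tokenized_words processed_labels (j + 1); omega
  · exact Nat.le_refl j
termination_by tokenized_words.length - j
decreasing_by omega

theorem pvRunEnd_succ (tokenized_words : List String) (processed_labels : List Bool) (j : Nat)
    (h1 : j < tokenized_words.length) (h2 : processed_labels.getD j false = false) :
    pvRunEnd tokenized_words processed_labels j = pvRunEnd tokenized_words processed_labels (j + 1) := by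
  rw [pvRunEnd, if_pos ⟨h1, h2⟩]

-- outer while loop of B
def pvScan (tokenized_words : List String) (processed_labels : List Bool) (i : Nat) :
    List (List (String × Int)) :=
  if _h : i < tokenized_words.length then
    if processed_labels.getD i false then
      pvScan tokenized_words processed_labels (i + 1)
    else
      let j := pvRunEnd tokenized_words processed_labels i
      ((List.range' i (j - i)).map (fun k => (tokenized_words.getD k "", (k : Int)))) ::
        pvScan tokenized_words processed_labels j
  else []
termination_by tokenized_words.length - i
decreasing_by
  · omega
  · have h1 : pvRunEnd tokenized_words processed_labels i
        = pvRunEnd tokenized_words processed_labels (i + 1) := by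
      apply pvRunEnd_succ <;> simp_all
    have h2 := pvRunEnd_ge tokenized_words processed_labels (i + 1)
    omega

def get_unprocessed_chunks_alt (tokenized_words : List String) (processed_labels : List Bool) :
    List (List (String × Int)) :=
  pvScan tokenized_words processed_labels 0

-- ===== PRECONDITION & SPEC =====
-- Pre_ excludes exactly the inputs on which A raises IndexError:
-- processed_labels shorter than tokenized_words (B raises there too).
def Pre_get_unprocessed_chunks (tokenized_words : List String) (processed_labels : List Bool) : Prop :=
  tokenized_words.length ≤ processed_labels.length
instance (tokenized_words : List String) (processed_labels : List Bool) : Decidable (Pre_get_unprocessed_chunks tokenized_words processed_labels) := by unfold Pre_get_unprocessed_chunks; infer_instance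

def pvWitness_get_unprocessed_chunks : List String × List Bool := (["a", "b", "c"], [false, true, false])

def Spec_get_unprocessed_chunks (tokenized_words : List String) (processed_labels : List Bool) (out : List (List (String × Int))) : Prop := out = get_unprocessed_chunks_alt tokenized_words processed_labels
instance (tokenized_words : List String) (processed_labels : List Bool) (out : List (List (String × Int))) : Decidable (Spec_get_unprocessed_chunks tokenized_words processed_labels out) := by unfold Spec_get_unprocessed_chunks; infer_instance

-- ===== CLAIM (what is proved, stated in full; the proofs are below) =====
def Claim_equal_get_unprocessed_chunks : Prop := ∀ (tokenized_words : List String) (processed_labels : List Bool), Dom_get_unprocessed_chunks tokenized_words processed_labels → Pre_get_unprocessed_chunks tokenized_words processed_labels → Spec_get_unprocessed_chunks tokenized_words processed_labels (get_unprocessed_chunks tokenized_words processed_labels)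

-- ===== LEMMAS AND PROOFS =====

theorem pvRunEnd_le (tokenized_words : List String) (processed_labels : List Bool) (j : Nat)
    (h : j ≤ tokenized_words.length) :
    pvRunEnd tokenized_words processed_labels j ≤ tokenized_words.length := by
  rw [pvRunEnd]
  split
  · exact pvRunEnd_le tokenized_words processed_labels (j + 1) (by omega)
  · exact h
termination_by tokenized_words.length - j
decreasing_by omega

theorem pvRunEnd_all_false (tokenized_words : List String) (processed_labels : List Bool) (j : Nat) :
    ∀ k, j ≤ k → k < pvRunEnd tokenized_words processed_labels j →
      processed_labels.getD k false = false := by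
  intro k hk1 hk2
  rw [pvRunEnd] at hk2
  split at hk2
  · rcases Nat.eq_or_lt_of_le hk1 with h | h
    · subst h; simp_all
    · exact pvRunEnd_all_false tokenized_words processed_labels (j + 1) k h hk2
  · omega
termination_by tokenized_words.length - j
decreasing_by omega

theorem pvRunEnd_stop (tokenized_words : List String) (processed_labels : List Bool) (j : Nat)
    (h : pvRunEnd tokenized_words processed_labels j < tokenized_words.length) :
    processed_labels.getD (pvRunEnd tokenized_words processed_labels j) false = true := by
  by_cases hc : j < tokenized_words.length ∧ processed_labels.getD j false = false
  · rw [pvRunEnd_succ tokenized_words processed_labels j hc.1 hc.2] at h ⊢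
    exact pvRunEnd_stop tokenized_words processed_labels (j + 1) h
  · have he : pvRunEnd tokenized_words processed_labels j = j := by
      rw [pvRunEnd, if_neg hc]
    rw [he] at h ⊢
    cases hx : processed_labels.getD j false with
    | false => exact absurd ⟨h, hx⟩ hc
    | true => rfl
termination_by tokenized_words.length - j
decreasing_by exact Nat.sub_succ_lt_self _ _ hc.1

-- the accumulator of A's fold only grows by appending: it can be factored out
theorem foldA_acc (tokenized_words : List String) (processed_labels : List Bool)
    (l : List Nat) (acc : List (List (String × Int))) (grp : List (String × Int)) :
    l.foldl (pvStepA tokenized_words processed_labels) (acc, grp)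
      = (acc ++ (l.foldl (pvStepA tokenized_words processed_labels) ([], grp)).1,
         (l.foldl (pvStepA tokenized_words processed_labels) ([], grp)).2) := by
  induction l generalizing acc grp with
  | nil => simp
  | cons i t ih =>
    simp only [List.foldl_cons]
    by_cases hb : processed_labels.getD i false
    · by_cases hg : grp = []
      · subst hg
        simp only [pvStepA, hb, if_true]
        simpa using ih acc []
      · simp only [pvStepA, hb, ne_eq, hg, not_false_eq_true, if_pos]
        rw [ih (acc ++ [grp]) []]
        simp only [List.nil_append]
        rw [ih [grp] []]
        simp
    · simp only [pvStepA, hb, if_false, Bool.false_eq_true]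
      exact ih acc (grp ++ [(tokenized_words.getD i "", (i : Int))])

-- over a run of unprocessed indices, A's fold only extends the group
theorem foldA_false_run (tokenized_words : List String) (processed_labels : List Bool)
    (m : Nat) : ∀ (i : Nat) (acc : List (List (String × Int))) (grp : List (String × Int)),
    (∀ k, i ≤ k → k < i + m → processed_labels.getD k false = false) →
    (List.range' i m).foldl (pvStepA tokenized_words processed_labels) (acc, grp)
      = (acc, grp ++ (List.range' i m).map (fun k => (tokenized_words.getD k "", (k : Int)))) := by
  induction m with
  | zero => intro i acc grp _; simp
  | succ m ih =>
    intro i acc grp h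
    rw [List.range'_succ]
    simp only [List.foldl_cons, List.map_cons]
    have hi : processed_labels.getD i false = false := h i (Nat.le_refl i) (by omega)
    simp only [pvStepA, hi, Bool.false_eq_true, if_false]
    rw [ih (i + 1) acc (grp ++ [(tokenized_words.getD i "", (i : Int))])
        (fun k h1 h2 => h k (by omega) (by omega))]
    simp

-- main invariant: processing indices i..n-1 from the empty state and flushing
-- equals B's run scan from i
theorem main_inv (tokenized_words : List String) (processed_labels : List Bool) :
    ∀ (N i : Nat), tokenized_words.length - i ≤ N →
    (let st := (List.range' i (tokenized_words.length - i)).foldl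
        (pvStepA tokenized_words processed_labels) ([], []);
     if st.2 ≠ [] then st.1 ++ [st.2] else st.1)
      = pvScan tokenized_words processed_labels i := by
  intro N
  induction N with
  | zero =>
    intro i h
    have : tokenized_words.length - i = 0 := by omega
    rw [pvScan]
    simp [this, dif_neg (by omega : ¬ i < tokenized_words.length)]
  | succ N ih =>
    intro i h
    by_cases hi : i < tokenized_words.length
    · by_cases hb : processed_labels.getD i false
      · -- processed index: A's step is a no-op on the empty state, B skips it
        have hr : tokenized_words.length - i = (tokenized_words.length - (i + 1)) + 1 := by omega
        rw [hr, List.range'_succ]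
        simp only [List.foldl_cons, pvStepA, hb, if_true, ne_eq, not_true_eq_false,
          reduceIte]
        rw [pvScan]
        simp only [hi, dif_pos, hb, if_true]
        exact ih (i + 1) (by omega)
      · -- unprocessed index: a maximal run [i, j) becomes one chunk in both
        simp only [Bool.not_eq_true] at hb
        set j := pvRunEnd tokenized_words processed_labels i with hj
        have hji : i + 1 ≤ j := by
          rw [hj, pvRunEnd_succ tokenized_words processed_labels i hi hb]
          exact pvRunEnd_ge tokenized_words processed_labels (i + 1)
        have hjn : j ≤ tokenized_words.length :=
          pvRunEnd_le tokenized_words processed_labels i (by omega)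
        have hall : ∀ k, i ≤ k → k < i + (j - i) → processed_labels.getD k false = false := by
          intro k h1 h2
          exact pvRunEnd_all_false tokenized_words processed_labels i k h1 (by omega)
        have hsplit : List.range' i (tokenized_words.length - i)
            = List.range' i (j - i) ++ List.range' j (tokenized_words.length - j) := by
          have hap := @List.range'_append i (j - i) (tokenized_words.length - j) 1
          simp only [Nat.one_mul] at hap
          rw [show i + (j - i) = j by omega] at hap
          rw [hap]
          congr 1
          omega
        have hrun := foldA_false_run tokenized_words processed_labels (j - i) i [] [] hall
        have hmap : (List.range' i (j - i)).map
            (fun k => (tokenized_words.getD k "", (k : Int))) ≠ [] := by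
          simp; omega
        rw [hsplit, List.foldl_append, hrun]
        simp only [List.nil_append]
        rw [pvScan]
        simp only [hi, dif_pos, hb, Bool.false_eq_true, if_false, ← hj]
        by_cases hjlt : j < tokenized_words.length
        · -- the run ends at a processed index j: A flushes there
          have hbj : processed_labels.getD j false = true :=
            pvRunEnd_stop tokenized_words processed_labels i hjlt
          have hr2 : tokenized_words.length - j = (tokenized_words.length - (j + 1)) + 1 := by
            omega
          rw [hr2, List.range'_succ]
          simp only [List.foldl_cons, pvStepA, hbj, ne_eq, hmap, not_false_eq_true,
            if_pos, List.nil_append]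
          rw [foldA_acc tokenized_words processed_labels _
              [(List.range' i (j - i)).map (fun k => (tokenized_words.getD k "", (k : Int)))] []]
          have hscan : pvScan tokenized_words processed_labels j
              = pvScan tokenized_words processed_labels (j + 1) := by
            rw [pvScan, dif_pos hjlt, if_pos hbj]
          rw [hscan, ← ih (j + 1) (by omega)]
          simp only []
          split <;> simp
        · -- the run reaches the end: the final flush emits it
          have : tokenized_words.length - j = 0 := by omega
          rw [this]
          simp only [List.range'_zero, List.foldl_nil, ne_eq, hmap, not_false_eq_true, if_pos,
            List.nil_append]
          have hscan : pvScan tokenized_words processed_labels j = [] := by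
            rw [pvScan]; simp [hjlt]
          rw [hscan]
    · rw [pvScan]
      have : tokenized_words.length - i = 0 := by omega
      simp [this, dif_neg hi]

-- ===== VERDICT (by name: the statement is the Claim_ definition above) =====
theorem get_unprocessed_chunks_spec : Claim_equal_get_unprocessed_chunks := by
  intro tokenized_words processed_labels _ _
  unfold Spec_get_unprocessed_chunks get_unprocessed_chunks get_unprocessed_chunks_alt
  have := main_inv tokenized_words processed_labels tokenized_words.length 0 (by omega)
  simpa [List.range_eq_range'] using this
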